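-- pv_equiv track=rewrite | github.com/clinton10-cyber/justice-vault | app.py | is_folder_link
-- ===== SOURCE A (Python) =====
-- def is_folder_link(url):
--     folder_indicators = [
--         '/folders/', '/drive/folders/', '#folders',
--         'drive.google.com/drive/folders',
--         'dropbox.com/sh/', 'onedrive.live.com/?id=',
--         '/sh/', '/folder/'
--     ]
--     return any(indicator in url for indicator in folder_indicators)
-- ===== SOURCE B (Python) =====
-- def is_folder_link(url):
--     folder_indicators = [
--         '/folders/', '/drive/folders/', '#folders',
--         'drive.google.com/drive/folders',
--         'dropbox.com/sh/', 'onedrive.live.com/?id=',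
--         '/sh/', '/folder/'
--     ]
--     # single left-to-right scan: at each position, does some indicator start here?
--     for i in range(len(url) + 1):
--         for ind in folder_indicators:
--             if url.startswith(ind, i):
--                 return True
--     return False
-- ===== Notes on version B (the rewrite author's own statement) =====
-- stated objective: alternative
-- what changed: Replaced the per-indicator substring-membership tests by a single left-to-right scan of the url that at each position checks whether any indicator starts there.
import Mathlib
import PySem

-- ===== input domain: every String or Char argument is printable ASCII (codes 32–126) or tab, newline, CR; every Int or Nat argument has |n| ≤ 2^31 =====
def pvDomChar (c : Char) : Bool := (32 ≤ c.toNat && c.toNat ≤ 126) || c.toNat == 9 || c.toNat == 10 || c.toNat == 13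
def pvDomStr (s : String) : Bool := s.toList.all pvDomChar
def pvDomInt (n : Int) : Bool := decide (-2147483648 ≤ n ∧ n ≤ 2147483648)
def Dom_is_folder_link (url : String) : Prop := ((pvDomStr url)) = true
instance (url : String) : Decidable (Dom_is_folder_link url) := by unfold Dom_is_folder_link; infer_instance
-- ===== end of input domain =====

-- B replaces the per-indicator 'in' tests by one left-to-right scan of the url; objective: alternative.

-- ===== PORT A =====
def folder_indicators : List String :=
  ["/folders/", "/drive/folders/", "#folders",
   "drive.google.com/drive/folders",
   "dropbox.com/sh/", "onedrive.live.com/?id=",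
   "/sh/", "/folder/"]

def is_folder_link (url : String) : Bool :=
  folder_indicators.any (fun indicator => PySem.Str.isIn indicator url)

-- ===== PORT B =====
-- Source B: at position i, does some indicator start there? (url.startswith(ind, i))
def fi_checkAt (cs : List Char) : Bool :=
  folder_indicators.any (fun ind => PySem.Chars.startswith cs ind.toList)

-- Source B's outer loop over i in range(len(url)+1), as recursion over the suffixes of url
def fi_scan : List Char → Bool
  | [] => fi_checkAt []
  | c :: t => fi_checkAt (c :: t) || fi_scan t

def is_folder_link_alt (url : String) : Bool := fi_scan url.toList

-- ===== PRECONDITION & SPEC =====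
def Spec_is_folder_link (url : String) (out : Bool) : Prop := out = is_folder_link_alt url
instance (url : String) (out : Bool) : Decidable (Spec_is_folder_link url out) := by unfold Spec_is_folder_link; infer_instance

-- ===== CLAIM (what is proved, stated in full; the proofs are below) =====
def Claim_equal_is_folder_link : Prop := ∀ (url : String), Dom_is_folder_link url → Spec_is_folder_link url (is_folder_link url)

-- ===== LEMMAS AND PROOFS =====
theorem fi_scan_iff (cs : List Char) :
    fi_scan cs = true ↔ ∃ j, fi_checkAt (cs.drop j) = true := by
  induction cs with
  | nil =>
    simp [fi_scan]
  | cons c t ih =>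
    simp [fi_scan, ih]
    constructor
    · rintro (h | ⟨j, hj⟩)
      · exact ⟨0, h⟩
      · exact ⟨j + 1, hj⟩
    · rintro ⟨j, hj⟩
      cases j with
      | zero => exact Or.inl hj
      | succ k => exact Or.inr ⟨k, hj⟩

-- ===== VERDICT (by name: the statement is the Claim_ definition above) =====
theorem is_folder_link_spec : Claim_equal_is_folder_link := by
  intro url _
  unfold Spec_is_folder_link
  rw [Bool.eq_iff_iff]
  simp only [is_folder_link, is_folder_link_alt, fi_scan_iff, fi_checkAt,
    List.any_eq_true, PySem.Str.isIn_iff_infix, PySem.Chars.startswith_iff]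
  constructor
  · rintro ⟨ind, hmem, hinf⟩
    obtain ⟨j, hj⟩ := (PySem.Chars.exists_prefix_drop_iff_isIn ind.toList url.toList).mpr
      ((PySem.Chars.isIn_iff_infix _ _).mpr hinf)
    exact ⟨j, ind, hmem, hj⟩
  · rintro ⟨j, ind, hmem, hj⟩
    exact ⟨ind, hmem, (PySem.Chars.isIn_iff_infix _ _).mp
      ((PySem.Chars.exists_prefix_drop_iff_isIn ind.toList url.toList).mp ⟨j, hj⟩)⟩
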